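-- pv_equiv track=rewrite | github.com/deka014/100-Days-Of-Code | Day-29/Array/reverseWordString3.py | reverseWords
-- ===== SOURCE A (Python) =====
-- def reverseWords(s: str) -> str:
--     output = ""
--     ans = []
--     def reversefunc(word):
--         ans.append(word[::-1])
--
--
--     for i in s.split() :
--         reversefunc(i)
--
--
--
--     return " ".join(ans)
-- ===== SOURCE B (Python) =====
-- def reverseWords(s: str) -> str:
--     words = []
--     i = 0
--     n = len(s)
--     while i < n:
--         if s[i].isspace():
--             i += 1
--             continue
--         buf = []
--         while i < n and not s[i].isspace():
--             buf.append(s[i])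
--             i += 1
--         buf.reverse()
--         words.append("".join(buf))
--     return " ".join(words)
-- ===== Notes on version B (the rewrite author's own statement) =====
-- stated objective: alternative
-- what changed: B replaces A's split()-then-slice-reverse-each-word pipeline (with its closure appending into a shared list) by a single hand-written index scan over the characters that collects each word's characters itself and reverses the buffer in place.
import Mathlib
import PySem

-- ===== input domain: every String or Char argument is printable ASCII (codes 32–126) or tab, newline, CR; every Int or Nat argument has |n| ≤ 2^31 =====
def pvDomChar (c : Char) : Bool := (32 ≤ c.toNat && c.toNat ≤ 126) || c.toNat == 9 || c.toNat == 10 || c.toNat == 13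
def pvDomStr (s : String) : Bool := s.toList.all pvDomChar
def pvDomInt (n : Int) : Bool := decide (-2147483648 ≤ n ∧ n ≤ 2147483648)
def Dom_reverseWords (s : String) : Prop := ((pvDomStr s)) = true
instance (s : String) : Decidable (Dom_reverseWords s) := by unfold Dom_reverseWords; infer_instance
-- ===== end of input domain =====

-- B replaces A's split()-based pipeline by a single hand-written character scan
-- that collects and reverses each word itself (objective: alternative, same cost).


-- ===== PORT A =====
-- for i in s.split(): ans.append(i[::-1]);  return " ".join(ans)
def reverseWords (s : String) : String :=
  let ans : List String :=
    (PySem.Str.split₀ s).foldl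
      (fun ans w => ans ++ [(PySem.Str.slice? w none none (-1)).getD ""]) []
  PySem.Str.join " " ans

-- ===== PORT B =====
-- inner while loop: append non-space chars to buf, return (buf, rest of chars)
def pvTakeWord : List Char → List Char → List Char × List Char
  | [], buf => (buf, [])
  | c :: cs, buf =>
    if PySem.Chars.isspace c then (buf, c :: cs) else pvTakeWord cs (buf ++ [c])

theorem pvTakeWord_snd_length : ∀ (cs buf : List Char), (pvTakeWord cs buf).2.length ≤ cs.length := by
  intro cs
  induction cs with
  | nil => intro buf; simp [pvTakeWord]
  | cons c cs ih =>
    intro buf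
    simp only [pvTakeWord]
    split
    · simp
    · exact le_trans (ih (buf ++ [c])) (Nat.le_succ _)

-- outer while loop over the index
def pvScan : List Char → List (List Char)
  | [] => []
  | c :: cs =>
    if PySem.Chars.isspace c then pvScan cs
    else
      (pvTakeWord cs [c]).1.reverse :: pvScan (pvTakeWord cs [c]).2
termination_by cs => cs.length
decreasing_by
  all_goals first
    | exact Nat.lt_succ_of_le (pvTakeWord_snd_length cs [c])
    | (simp; try omega)

def reverseWords_alt (s : String) : String :=
  PySem.Str.join " " ((pvScan s.toList).map String.ofList)

-- ===== PRECONDITION & SPEC =====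
def Spec_reverseWords (s : String) (out : String) : Prop := out = reverseWords_alt s
instance (s : String) (out : String) : Decidable (Spec_reverseWords s out) := by unfold Spec_reverseWords; infer_instance

-- ===== CLAIM (what is proved, stated in full; the proofs are below) =====
def Claim_equal_reverseWords : Prop := ∀ (s : String), Dom_reverseWords s → Spec_reverseWords s (reverseWords s)

-- ===== LEMMAS AND PROOFS =====

-- the non-space predicate
def pvP (c : Char) : Bool := !PySem.Chars.isspace c

-- clean recursive characterisation of whitespace-splitting
def pvW : List Char → List (List Char)
  | [] => []
  | c :: cs =>
    if PySem.Chars.isspace c then pvW cs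
    else (c :: cs.takeWhile pvP) :: pvW (cs.dropWhile pvP)
termination_by cs => cs.length
decreasing_by
  all_goals first
    | exact Nat.lt_succ_of_le (List.length_dropWhile_le pvP cs)
    | (simp; try omega)

theorem pvGo_eq : ∀ (cs cur : List Char) (accs : List (List Char)),
    PySem.Chars.split₀.go cs cur accs =
      accs.reverse ++ (if cur = [] then pvW cs
        else (cur.reverse ++ cs.takeWhile pvP) :: pvW (cs.dropWhile pvP)) := by
  intro cs
  induction cs with
  | nil =>
    intro cur accs
    by_cases h : cur = [] <;> simp [PySem.Chars.split₀.go, pvW, h]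
  | cons c cs ih =>
    intro cur accs
    by_cases hc : PySem.Chars.isspace c <;> by_cases h : cur = [] <;>
      simp [PySem.Chars.split₀.go, hc, h, ih, pvW, pvP,
            List.takeWhile_cons, List.dropWhile_cons]

theorem pvSplit₀_eq_pvW (cs : List Char) : PySem.Chars.split₀ cs = pvW cs := by
  have h := pvGo_eq cs [] []
  simpa [PySem.Chars.split₀] using h

theorem pvTakeWord_eq (cs buf : List Char) :
    pvTakeWord cs buf = (buf ++ cs.takeWhile pvP, cs.dropWhile pvP) := by
  induction cs generalizing buf with
  | nil => simp [pvTakeWord]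
  | cons c cs ih =>
    simp only [pvTakeWord]
    by_cases h : PySem.Chars.isspace c
    · simp [h, pvP]
    · simp [h, ih, pvP]

theorem pvScan_eq_map_reverse (cs : List Char) : pvScan cs = (pvW cs).map List.reverse := by
  induction cs using pvScan.induct with
  | case1 => simp [pvScan, pvW]
  | case2 c cs h ih => simp [pvScan, pvW, h, ih]
  | case3 c cs h ih =>
    rw [pvScan, if_neg h, pvW, if_neg h]
    rw [pvTakeWord_eq] at ih
    simp [pvTakeWord_eq, ih]

-- ===== VERDICT (by name: the statement is the Claim_ definition above) =====
theorem reverseWords_spec : Claim_equal_reverseWords := by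
  intro s _
  unfold Spec_reverseWords reverseWords reverseWords_alt
  rw [PySem.List.foldl_append_singleton_eq_map]
  simp only [List.nil_append]
  congr 1
  rw [PySem.Str.split₀, pvScan_eq_map_reverse, ← pvSplit₀_eq_pvW]
  simp [PySem.Str.slice?_none_none_neg_one, List.map_map, Function.comp]
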